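-- pv_equiv track=rewrite | github.com/hkust-nlp/dart-math | dart_math/eval.py | index_first_paren_pair
-- ===== SOURCE A (Python) =====
-- PAREN_MAP = {
--     r"\(": r"\)",
--     r"\[": r"\]",
--     r"\{": r"\}",
--     "(": ")",
--     "[": "]",
--     "{": "}",
-- }
--
-- def index_first_paren_pair(s: str, l: str) -> tuple[int, int]:
--     r = PAREN_MAP[l]
--     try:
--         i_l = s.index(l)
--     except ValueError:
--         return -1, -1
--     len_paren = len(l)
--
--     depth = 0
--     i_r = -1
--     for i_c in range(i_l, len(s)):
--         if s[i_c : i_c + len_paren] == l: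
--             depth -= 1
--         elif s[i_c : i_c + len_paren] == r:
--             depth += 1
--         if depth == 0:
--             i_r = i_c
--             break
--
--     return i_l, i_r
-- ===== SOURCE B (Python) =====
-- PAREN_MAP = {
--     r"\(": r"\)",
--     r"\[": r"\]",
--     r"\{": r"\}",
--     "(": ")",
--     "[": "]",
--     "{": "}",
-- }
--
--
-- def index_first_paren_pair(s: str, l: str) -> tuple[int, int]:
--     r = PAREN_MAP[l]
--     i_l = s.find(l)
--     if i_l == -1:
--         return -1, -1
--     # the opening delimiter at i_l is already consumed: depth starts at -1
--     depth = -1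
--     pos = i_l + len(l)
--     while True:
--         j_r = s.find(r, pos)
--         if j_r == -1:
--             return i_l, -1
--         j_l = s.find(l, pos)
--         if j_l != -1 and j_l < j_r:
--             depth -= 1
--             pos = j_l + len(l)
--         else:
--             depth += 1
--             if depth == 0:
--                 return i_l, j_r
--             pos = j_r + len(r)
-- ===== Notes on version B (the rewrite author's own statement) =====
-- stated objective: alternative
-- what changed: B replaces A's per-position slice-comparison scan (which tests s[i:i+len] against both delimiters at every index after the first opener) with a find-jump loop: depth starts at -1 with the opener consumed, and each iteration uses str.find to jump directly to the next occurrence of l or r, advancing past it; same worst-case O(n) passes but C-level find instead of a Python-level loop with slicing.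
-- outside the precondition, e.g. on index_first_paren_pair('(a)', '<'): A raises KeyError, B raises KeyError
import Mathlib
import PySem

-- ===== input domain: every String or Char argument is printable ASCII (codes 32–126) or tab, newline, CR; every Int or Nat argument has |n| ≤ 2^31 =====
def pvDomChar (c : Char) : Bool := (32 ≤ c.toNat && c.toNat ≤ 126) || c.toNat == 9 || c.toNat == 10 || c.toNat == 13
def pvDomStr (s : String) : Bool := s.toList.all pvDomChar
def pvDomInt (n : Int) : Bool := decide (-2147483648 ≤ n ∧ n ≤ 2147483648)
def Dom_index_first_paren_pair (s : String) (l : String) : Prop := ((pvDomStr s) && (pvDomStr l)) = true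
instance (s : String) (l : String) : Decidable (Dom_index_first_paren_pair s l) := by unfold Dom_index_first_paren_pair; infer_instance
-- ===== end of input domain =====

-- B replaces A's per-character slice scan with find-jumps between delimiter occurrences (same worst-case bound, fewer comparisons); return-value equivalence proved for every l that is a key of PAREN_MAP.


-- module constant PAREN_MAP, shared by both programs
def pvParenMap : PySem.Dict String String :=
  PySem.Dict.ofList [("\\(", "\\)"), ("\\[", "\\]"), ("\\{", "\\}"), ("(", ")"), ("[", "]"), ("{", "}")]

-- ===== PORT A =====
-- A's for-loop over range(i_l, len(s)) with break: every position scanned one by one,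
-- slice comparison s[i_c : i_c + len(l)] against l and r at each position.
def loopA (cs lq rq : List Char) (i_c : Nat) (depth : Int) : Int :=
  if _h : i_c < cs.length then
    let dep : Int :=
      if PySem.List.slice cs (some (i_c : Int)) (some ((i_c : Int) + (lq.length : Int))) = lq then depth - 1
      else if PySem.List.slice cs (some (i_c : Int)) (some ((i_c : Int) + (lq.length : Int))) = rq then depth + 1
      else depth
    if dep = 0 then (i_c : Int) else loopA cs lq rq (i_c + 1) dep
  else -1
termination_by cs.length - i_c

def bodyA (cs lq rq : List Char) : Int × Int :=
  let i_l := PySem.Chars.find cs lq            -- s.index(l) inside try/except ValueError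
  if i_l = -1 then (-1, -1)
  else (i_l, loopA cs lq rq i_l.toNat 0)

def index_first_paren_pair (s : String) (l : String) : Int × Int :=
  match PySem.Dict.get? pvParenMap l with
  | none => (-1, -1)                           -- Python raises KeyError here; excluded by Pre_
  | some r => bodyA s.toList l.toList r.toList

-- ===== PORT B =====
-- B's while-True loop jumping with s.find(l, pos) / s.find(r, pos); the fuel only makes the
-- recursion total (pos strictly increases, so cs.length + 1 steps always suffice).
def loopB (cs lq rq : List Char) (fuel : Nat) (pos : Nat) (depth : Int) : Int :=
  match fuel with
  | 0 => -1                                    -- unreachable with the fuel bodyB supplies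
  | fuel + 1 =>
    let j_r := PySem.Chars.findFrom cs rq (pos : Int) none
    if j_r = -1 then -1
    else
      let j_l := PySem.Chars.findFrom cs lq (pos : Int) none
      if j_l ≠ -1 ∧ j_l < j_r then loopB cs lq rq fuel (j_l.toNat + lq.length) (depth - 1)
      else if depth + 1 = 0 then j_r
      else loopB cs lq rq fuel (j_r.toNat + rq.length) (depth + 1)

def bodyB (cs lq rq : List Char) : Int × Int :=
  let i_l := PySem.Chars.find cs lq
  if i_l = -1 then (-1, -1)
  else (i_l, loopB cs lq rq (cs.length + 1) (i_l.toNat + lq.length) (-1))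

def index_first_paren_pair_alt (s : String) (l : String) : Int × Int :=
  match PySem.Dict.get? pvParenMap l with
  | none => (-1, -1)                           -- Python raises KeyError here; excluded by Pre_
  | some r => bodyB s.toList l.toList r.toList

-- ===== PRECONDITION & SPEC =====
-- Pre_ excludes exactly the l that are not keys of PAREN_MAP: there A raises KeyError.
def Pre_index_first_paren_pair (s : String) (l : String) : Prop :=
  l ∈ ["\\(", "\\[", "\\{", "(", "[", "{"]
instance (s : String) (l : String) : Decidable (Pre_index_first_paren_pair s l) := by
  unfold Pre_index_first_paren_pair; infer_instance

def pvWitness_index_first_paren_pair : String × String := ("a(b(c)d)e", "(")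

def Spec_index_first_paren_pair (s : String) (l : String) (out : Int × Int) : Prop := out = index_first_paren_pair_alt s l
instance (s : String) (l : String) (out : Int × Int) : Decidable (Spec_index_first_paren_pair s l out) := by unfold Spec_index_first_paren_pair; infer_instance

-- ===== CLAIM (what is proved, stated in full; the proofs are below) =====
def Claim_equal_index_first_paren_pair : Prop := ∀ (s : String) (l : String), Dom_index_first_paren_pair s l → Pre_index_first_paren_pair s l → Spec_index_first_paren_pair s l (index_first_paren_pair s l)

-- ===== LEMMAS AND PROOFS =====

-- A's slice test at position i is a prefix test on cs.drop i (pattern of exactly that length).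
theorem sliceEq (t sub : List Char) (i : Nat) :
    (PySem.List.slice t (some (i : Int)) (some ((i : Int) + (sub.length : Int))) = sub) ↔ sub <+: t.drop i := by
  rw [PySem.List.slice_natCast_add, List.prefix_iff_eq_take, eq_comm]

theorem sliceEq' (t sub other : List Char) (i : Nat) (hl : other.length = sub.length) :
    (PySem.List.slice t (some (i : Int)) (some ((i : Int) + (sub.length : Int))) = other) ↔ other <+: t.drop i := by
  rw [← hl, PySem.List.slice_natCast_add, List.prefix_iff_eq_take, eq_comm]

theorem loopA_stop (cs lq rq : List Char) (i : Nat) (d : Int) (h : cs.length ≤ i) :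
    loopA cs lq rq i d = -1 := by
  rw [loopA]; simp [Nat.not_lt.mpr h]

-- A's scan walks unchanged across a stretch that contains no occurrence of either delimiter.
theorem loopA_skip (cs lq rq : List Char) (pos q : Nat) (depth : Int)
    (hpq : pos ≤ q)
    (hno : ∀ k, pos ≤ k → k < q → ¬ lq <+: cs.drop k ∧ ¬ rq <+: cs.drop k)
    (hlen : rq.length = lq.length)
    (hd : depth ≠ 0) :
    loopA cs lq rq pos depth = loopA cs lq rq q depth := by
  obtain ⟨n, hn⟩ : ∃ n, q = pos + n := ⟨q - pos, by omega⟩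
  subst hn
  clear hpq
  induction n generalizing pos with
  | zero => rfl
  | succ n ih =>
    by_cases h : pos < cs.length
    · rw [loopA]
      rw [dif_pos h]
      have h1 : ¬ lq <+: cs.drop pos := (hno pos (le_refl _) (by omega)).1
      have h2 : ¬ rq <+: cs.drop pos := (hno pos (le_refl _) (by omega)).2
      simp only [sliceEq, sliceEq' cs lq rq pos hlen, h1, h2, if_false, hd]
      have hq : pos + (n+1) = (pos+1)+n := by omega
      rw [hq]
      exact ih (pos + 1) (fun k hk1 hk2 => hno k (by omega) (by omega))
    · rw [loopA_stop cs lq rq pos depth (by omega), loopA_stop cs lq rq _ depth (by omega)]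

-- with no closer anywhere ahead, a negative depth can never come back to 0: A scans off the end.
theorem loopA_noR (cs lq rq : List Char) (pos : Nat) (depth : Int)
    (hlen : rq.length = lq.length)
    (hno : ∀ k, pos ≤ k → ¬ rq <+: cs.drop k)
    (hd : depth < 0) :
    loopA cs lq rq pos depth = -1 := by
  obtain ⟨n, hn⟩ : ∃ n, cs.length ≤ pos + n := ⟨cs.length, by omega⟩
  induction n generalizing pos depth with
  | zero => exact loopA_stop cs lq rq pos depth (by omega)
  | succ n ih =>
    by_cases h : pos < cs.length
    · rw [loopA, dif_pos h]
      have h2 : ¬ rq <+: cs.drop pos := hno pos (le_refl _)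
      by_cases h1 : lq <+: cs.drop pos
      · simp only [sliceEq, sliceEq' cs lq rq pos hlen, h1, if_true]
        rw [if_neg (by omega)]
        exact ih (pos+1) (depth-1) (fun k hk => hno k (by omega)) (by omega) (by omega)
      · simp only [sliceEq, sliceEq' cs lq rq pos hlen, h1, h2, if_false]
        rw [if_neg (by omega)]
        exact ih (pos+1) depth (fun k hk => hno k (by omega)) hd (by omega)
    · exact loopA_stop cs lq rq pos depth (by omega)

theorem prefix_drop_mono (t sub : List Char) (k m : Nat) (hkm : k ≤ m) (h : sub <+: t.drop m) :
    sub <:+: t.drop k := by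
  have hd : t.drop m = (t.drop k).drop (m - k) := by rw [List.drop_drop]; congr 1; omega
  rw [hd] at h
  exact h.isInfix.trans (List.drop_suffix _ _).isInfix

theorem prefix_eq_of_same_start (t a b : List Char) (i : Nat) (hlen : b.length = a.length)
    (ha : a <+: t.drop i) (hb : b <+: t.drop i) : a = b := by
  rw [List.prefix_iff_eq_take] at ha hb
  rw [ha, hb, hlen]

-- core equivalence: from any resume point pos (everything before pos already processed, both
-- delimiters absent from [pos-of-last-match .. pos)) with depth < 0, A's per-character scan
-- and B's find-jump loop return the same index.
theorem loop_main (cs lq rq : List Char)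
    (hlen : rq.length = lq.length) (hne : lq ≠ rq) (hpos : 0 < lq.length)
    (hov : ∀ j k, (lq <+: cs.drop j ∨ rq <+: cs.drop j) → j < k → k < j + lq.length →
      ¬ lq <+: cs.drop k ∧ ¬ rq <+: cs.drop k)
    (fuel pos : Nat) (depth : Int)
    (hd : depth < 0) (hpl : pos ≤ cs.length) (hf : cs.length - pos < fuel) :
    loopA cs lq rq pos depth = loopB cs lq rq fuel pos depth := by
  induction fuel generalizing pos depth with
  | zero => omega
  | succ fuel ih =>
    rw [loopB]
    by_cases hjr : PySem.Chars.findFrom cs rq (pos : Int) none = -1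
    · rw [if_pos hjr]
      have hnoR : ¬ rq <:+: cs.drop pos := (PySem.Chars.findFrom_natCast_eq_neg_one_iff cs rq pos hpl).mp hjr
      exact loopA_noR cs lq rq pos depth hlen
        (fun k hk hpre => hnoR (prefix_drop_mono cs rq pos k hk hpre)) hd
    · rw [if_neg hjr]
      obtain ⟨hRpos, hRpre, hRmin⟩ := PySem.Chars.findFrom_natCast_spec cs rq pos hpl hjr
      set jr := PySem.Chars.findFrom cs rq (pos : Int) none with hjrdef
      have hjr0 : 0 ≤ jr := le_trans (by positivity) hRpos
      have hRcast : ((jr.toNat : Nat) : Int) = jr := Int.toNat_of_nonneg hjr0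
      have hRlen : jr.toNat + lq.length ≤ cs.length := by
        have := hRpre.length_le
        simp [List.length_drop] at this
        omega
      by_cases hc : PySem.Chars.findFrom cs lq (pos : Int) none ≠ -1 ∧
          PySem.Chars.findFrom cs lq (pos : Int) none < jr
      · rw [if_pos hc]
        obtain ⟨hLpos, hLpre, hLmin⟩ := PySem.Chars.findFrom_natCast_spec cs lq pos hpl hc.1
        set jl := PySem.Chars.findFrom cs lq (pos : Int) none with hjldef
        have hjl0 : 0 ≤ jl := le_trans (by positivity) hLpos
        have hLR : jl.toNat < jr.toNat := by omega
        have hposL : pos ≤ jl.toNat := by omega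
        have hLlen : jl.toNat + lq.length ≤ cs.length := by
          have := hLpre.length_le
          simp [List.length_drop] at this
          omega
        -- A skips to jl.toNat, takes the opener step, skips across the opener's characters
        rw [loopA_skip cs lq rq pos jl.toNat depth hposL
          (fun k hk1 hk2 => ⟨hLmin k hk1 hk2, hRmin k hk1 (by omega)⟩) (by omega) (by omega)]
        rw [loopA, dif_pos (by omega)]
        simp only [sliceEq, sliceEq' cs lq rq _ hlen, hLpre, if_true]
        rw [if_neg (by omega)]
        rw [loopA_skip cs lq rq (jl.toNat + 1) (jl.toNat + lq.length) (depth - 1) (by omega)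
          (fun k hk1 hk2 => hov jl.toNat k (Or.inl hLpre) (by omega) (by omega)) (by omega) (by omega)]
        exact ih (jl.toNat + lq.length) (depth - 1) (by omega) hLlen (by omega)
      · rw [if_neg hc]
        -- no opener before jr: A skips to jr.toNat and takes the closer step there
        have hnoL : ∀ k, pos ≤ k → k < jr.toNat → ¬ lq <+: cs.drop k := by
          intro k hk1 hk2 hpre
          by_cases hjl : PySem.Chars.findFrom cs lq (pos : Int) none = -1
          · exact (PySem.Chars.findFrom_natCast_eq_neg_one_iff cs lq pos hpl).mp hjl
              (prefix_drop_mono cs lq pos k hk1 hpre)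
          · obtain ⟨hLpos, hLpre, hLmin⟩ := PySem.Chars.findFrom_natCast_spec cs lq pos hpl hjl
            have : jr ≤ PySem.Chars.findFrom cs lq (pos : Int) none := by
              by_contra hlt
              exact hc ⟨hjl, by omega⟩
            exact hLmin k hk1 (by omega) hpre
        rw [loopA_skip cs lq rq pos jr.toNat depth (by omega)
          (fun k hk1 hk2 => ⟨hnoL k hk1 hk2, hRmin k hk1 hk2⟩) (by omega) (by omega)]
        have hnoLR : ¬ lq <+: cs.drop jr.toNat := fun hpre =>
          hne (prefix_eq_of_same_start cs lq rq jr.toNat (by omega) hpre hRpre)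
        rw [loopA, dif_pos (by omega)]
        simp only [sliceEq, sliceEq' cs lq rq _ hlen, hnoLR, hRpre, if_true, if_false]
        by_cases hz : depth + 1 = 0
        · rw [if_pos hz, if_pos hz, hRcast]
        · rw [if_neg hz, if_neg hz]
          rw [loopA_skip cs lq rq (jr.toNat + 1) (jr.toNat + lq.length) (depth + 1) (by omega)
            (fun k hk1 hk2 => hov jr.toNat k (Or.inr hRpre) (by omega) (by omega)) (by omega) hz]
          rw [hlen]
          exact ih (jr.toNat + lq.length) (depth + 1) (by omega) hRlen (by omega)

theorem bodyEq (cs lq rq : List Char)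
    (hlen : rq.length = lq.length) (hne : lq ≠ rq) (hpos : 0 < lq.length)
    (hov : ∀ j k, (lq <+: cs.drop j ∨ rq <+: cs.drop j) → j < k → k < j + lq.length →
      ¬ lq <+: cs.drop k ∧ ¬ rq <+: cs.drop k) :
    bodyA cs lq rq = bodyB cs lq rq := by
  unfold bodyA bodyB
  by_cases h : PySem.Chars.find cs lq = -1
  · simp only [h, if_pos]
  · simp only [h, if_false]
    have h0 : 0 ≤ PySem.Chars.find cs lq := by
      have := PySem.Chars.neg_one_le_find cs lq
      omega
    obtain ⟨hLpre, -⟩ := PySem.Chars.find_spec h0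
    set L := (PySem.Chars.find cs lq).toNat with hL
    have hLlen : L + lq.length ≤ cs.length := by
      have := hLpre.length_le
      simp [List.length_drop] at this
      omega
    refine Prod.ext rfl ?_
    show loopA cs lq rq L 0 = loopB cs lq rq (cs.length + 1) (L + lq.length) (-1)
    rw [loopA, dif_pos (by omega)]
    simp only [sliceEq, sliceEq' cs lq rq _ hlen, hLpre, if_true]
    rw [if_neg (by omega)]
    rw [loopA_skip cs lq rq (L + 1) (L + lq.length) (0 - 1) (by omega)
      (fun k hk1 hk2 => hov L k (Or.inl hLpre) (by omega) (by omega)) (by omega) (by omega)]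
    have h01 : (0 : Int) - 1 = -1 := by omega
    rw [h01]
    exact loop_main cs lq rq hlen hne hpos hov (cs.length + 1) (L + lq.length) (-1)
      (by omega) hLlen (by omega)

-- the two-character delimiters "\X" / "\Y" cannot start inside an occurrence of one another
theorem ov2 (x y : Char) (hx : x ≠ '\\') (hy : y ≠ '\\') (cs : List Char) :
    ∀ j k, (['\\', x] <+: cs.drop j ∨ ['\\', y] <+: cs.drop j) → j < k → k < j + 2 →
      ¬ ['\\', x] <+: cs.drop k ∧ ¬ ['\\', y] <+: cs.drop k := by
  intro j k hm hjk hk2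
  have hk : k = j + 1 := by omega
  subst hk
  have htail : cs.drop (j+1) = (cs.drop j).tail := by rw [List.tail_drop]
  rcases hm with ⟨t, ht⟩ | ⟨t, ht⟩ <;>
    · rw [← ht] at htail
      simp at htail
      constructor <;>
        · rw [htail]
          intro hp
          rcases List.cons_prefix_cons.mp hp with ⟨he, -⟩
          first | exact hx he.symm | exact hy he.symm

-- one-character delimiters trivially cannot overlap
theorem ov1 (lq rq : List Char) (h : lq.length = 1) (cs : List Char) :
    ∀ j k, (lq <+: cs.drop j ∨ rq <+: cs.drop j) → j < k → k < j + lq.length →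
      ¬ lq <+: cs.drop k ∧ ¬ rq <+: cs.drop k := by
  intro j k _ h1 h2; omega

-- ===== VERDICT (by name: the statement is the Claim_ definition above) =====
theorem index_first_paren_pair_spec : Claim_equal_index_first_paren_pair := by
  intro s l _ hpre
  unfold Spec_index_first_paren_pair index_first_paren_pair index_first_paren_pair_alt
  unfold Pre_index_first_paren_pair at hpre
  fin_cases hpre
  · exact bodyEq s.toList "\\(".toList "\\)".toList rfl (by decide) (by decide)
      (ov2 '(' ')' (by decide) (by decide) s.toList)
  · exact bodyEq s.toList "\\[".toList "\\]".toList rfl (by decide) (by decide)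
      (ov2 '[' ']' (by decide) (by decide) s.toList)
  · exact bodyEq s.toList "\\{".toList "\\}".toList rfl (by decide) (by decide)
      (ov2 '{' '}' (by decide) (by decide) s.toList)
  · exact bodyEq s.toList "(".toList ")".toList rfl (by decide) (by decide)
      (ov1 "(".toList ")".toList rfl s.toList)
  · exact bodyEq s.toList "[".toList "]".toList rfl (by decide) (by decide)
      (ov1 "[".toList "]".toList rfl s.toList)
  · exact bodyEq s.toList "{".toList "}".toList rfl (by decide) (by decide)
      (ov1 "{".toList "}".toList rfl s.toList)
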